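-- pv_equiv track=rewrite | github.com/RemoveWatermarksFromShortVideos/watermarks | make_cover_007.py | get_most_common_position
-- ===== SOURCE A (Python) =====
-- from collections import Counter
--
-- def get_most_common_position(positions):
--     """统计最常见的水印坐标"""
--     if not positions:
--         return None
--     x_coords = [pos[0] for pos in positions]
--
--     # 初始化最常见的宽度和高度
--     most_common_width = None
--     most_common_height = None
--     # 找出 x 和 y 位置的最常值
--     most_common_x = Counter(x_coords).most_common(1)[0][0]
--
--     # 获取与最常见的 x 和 y 值对应的宽度和高度
--     for pos in positions:
--         if pos[0] == most_common_x:
--             most_common_y = pos[1]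
--             most_common_width = pos[2]
--             most_common_height = pos[3]
--             break
--
--     return most_common_x, most_common_y, most_common_width, most_common_height
-- ===== SOURCE B (Python) =====
-- def get_most_common_position(positions):
--     """统计最常见的水印坐标"""
--     if not positions:
--         return None
--     best = None
--     best_count = 0
--     for pos in positions:
--         c = sum(1 for p in positions if p[0] == pos[0])
--         if c > best_count:
--             best = pos
--             best_count = c
--     return best[0], best[1], best[2], best[3]
-- ===== Notes on version B (the rewrite author's own statement) =====
-- stated objective: alternative
-- what changed: Replaces Counter + most_common(1) sort + a second search loop by a single strict-maximum scan over the positions themselves, recomputing each x's frequency with a nested count; the first strict maximum automatically reproduces both the earliest-insertion tie-break and the first matching position, with no auxiliary dict at all.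
import Mathlib
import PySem

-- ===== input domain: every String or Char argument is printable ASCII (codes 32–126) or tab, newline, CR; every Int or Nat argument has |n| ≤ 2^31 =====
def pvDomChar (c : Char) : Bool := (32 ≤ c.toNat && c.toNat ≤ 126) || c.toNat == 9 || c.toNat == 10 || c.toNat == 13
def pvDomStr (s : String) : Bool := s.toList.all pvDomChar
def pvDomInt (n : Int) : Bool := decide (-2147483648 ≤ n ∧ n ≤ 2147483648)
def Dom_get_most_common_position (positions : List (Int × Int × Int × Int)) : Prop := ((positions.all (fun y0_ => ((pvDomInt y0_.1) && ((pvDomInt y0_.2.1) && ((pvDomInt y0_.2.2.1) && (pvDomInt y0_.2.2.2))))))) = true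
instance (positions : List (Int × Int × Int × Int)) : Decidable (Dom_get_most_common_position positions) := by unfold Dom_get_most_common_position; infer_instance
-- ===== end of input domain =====

-- B replaces Counter + most_common(1) + a second search loop by a single strict-maximum scan
-- over the positions, recomputing each x's frequency with a nested count; objective: alternative.

-- ===== PORT A =====
def get_most_common_position (positions : List (Int × Int × Int × Int)) : Option (Int × Int × Int × Int) :=
  if positions = [] then none
  else
    -- x_coords = positions.map (·.1); Counter(x_coords).most_common(1)[0][0]
    -- = head of the counter's items sorted by count descending (stable)
    match PySem.List.sorted (PySem.Dict.counter (positions.map (fun pos => pos.1))).items (fun p => p.2) true with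
    | [] => none  -- unreachable: positions ≠ [], so the counter has at least one item
    | (most_common_x, _) :: _ =>
      -- 'for pos in positions: if pos[0] == most_common_x: … break'
      match positions.find? (fun pos => pos.1 == most_common_x) with
      | some pos => some (most_common_x, pos.2.1, pos.2.2.1, pos.2.2.2)
      | none => none  -- unreachable: most_common_x is an x-coordinate of some position

-- ===== PORT B =====
def get_most_common_position_alt (positions : List (Int × Int × Int × Int)) : Option (Int × Int × Int × Int) :=
  if positions = [] then none
  else
    -- 'for pos in positions: c = sum(1 for p in positions if p[0] == pos[0]);
    --  if c > best_count: best = pos; best_count = c'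
    match (positions.foldl (fun (st : Option (Int × Int × Int × Int) × Int) pos =>
        let c : Int := (positions.countP (fun p => p.1 == pos.1) : Nat)
        if c > st.2 then (some pos, c) else st) (none, 0)).1 with
    | some b => some (b.1, b.2.1, b.2.2.1, b.2.2.2)
    | none => none

-- ===== PRECONDITION & SPEC =====
def Spec_get_most_common_position (positions : List (Int × Int × Int × Int)) (out : Option (Int × Int × Int × Int)) : Prop := out = get_most_common_position_alt positions
instance (positions : List (Int × Int × Int × Int)) (out : Option (Int × Int × Int × Int)) : Decidable (Spec_get_most_common_position positions out) := by unfold Spec_get_most_common_position; infer_instance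

-- ===== CLAIM (what is proved, stated in full; the proofs are below) =====
def Claim_equal_get_most_common_position : Prop := ∀ (positions : List (Int × Int × Int × Int)), Dom_get_most_common_position positions → Spec_get_most_common_position positions (get_most_common_position positions)

-- ===== LEMMAS AND PROOFS =====

-- the common 'keep the first strict maximum' step both programs reduce to
def pvPickStep {α : Type} (key : α → Int) (b : Option α) (x : α) : Option α :=
  match b with
  | none => some x
  | some h => if key h < key x then some x else some h

-- the first occurrences of each x-coordinate (seen set s), in order
def pvFirstOcc : List (Int × Int × Int × Int) → List Int → List (Int × Int × Int × Int)
  | [], _ => []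
  | p :: t, s => if p.1 ∈ s then pvFirstOcc t s else p :: pvFirstOcc t (s ++ [p.1])

theorem pv_head_insertBy {α : Type} (key : α → Int) (x : α) (ys : List α) :
    (PySem.List.insertBy (fun a b => decide (key b < key a)) x ys).head? =
      pvPickStep key ys.head? x := by
  cases ys with
  | nil => simp [PySem.List.insertBy, pvPickStep]
  | cons y t =>
    by_cases h : key y < key x <;>
      simp [PySem.List.insertBy, pvPickStep, h]

theorem pv_head_foldl_insertBy {α : Type} (key : α → Int) (l : List α) : ∀ (acc : List α),
    (l.foldl (fun acc x => PySem.List.insertBy (fun a b => decide (key b < key a)) x acc) acc).head? =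
      l.foldl (pvPickStep key) acc.head? := by
  induction l with
  | nil => intro acc; rfl
  | cons p t ih =>
    intro acc
    rw [List.foldl_cons, ih, List.foldl_cons, pv_head_insertBy]

theorem pv_pick_map {α β : Type} (g : α → β) (key : β → Int) (l : List α) : ∀ (b : Option α),
    (l.map g).foldl (pvPickStep key) (b.map g) =
      (l.foldl (pvPickStep (fun a => key (g a))) b).map g := by
  induction l with
  | nil => intro b; rfl
  | cons p t ih =>
    intro b
    cases b with
    | none =>
      simp only [List.map_cons, List.foldl_cons, Option.map_none, pvPickStep]
      exact ih (some p)
    | some h =>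
      simp only [List.map_cons, List.foldl_cons, Option.map_some, pvPickStep]
      by_cases hlt : key (g h) < key (g p)
      · simp only [if_pos hlt]
        exact ih (some p)
      · simp only [if_neg hlt]
        exact ih (some h)

theorem pv_pick_some {α : Type} (key : α → Int) (t : List α) : ∀ (x : α),
    ∃ k, t.foldl (pvPickStep key) (some x) = some k ∧ (k = x ∨ k ∈ t) := by
  induction t with
  | nil => intro x; exact ⟨x, rfl, Or.inl rfl⟩
  | cons q t ih =>
    intro x
    rw [List.foldl_cons]
    by_cases h : key x < key q
    · obtain ⟨k, hk, hm⟩ := ih q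
      refine ⟨k, ?_, ?_⟩
      · simpa [pvPickStep, h] using hk
      · rcases hm with h' | h'
        · exact Or.inr (by simp [h'])
        · exact Or.inr (List.mem_cons_of_mem _ h')
    · obtain ⟨k, hk, hm⟩ := ih x
      refine ⟨k, ?_, ?_⟩
      · simpa [pvPickStep, h] using hk
      · rcases hm with h' | h'
        · exact Or.inl h'
        · exact Or.inr (List.mem_cons_of_mem _ h')

-- the x-coordinates of the first occurrences are exactly set(x_coords), in order
theorem pv_update_firstOcc (l : List (Int × Int × Int × Int)) : ∀ (s : List Int),
    PySem.Set.update s (l.map (fun p => p.1)) = s ++ (pvFirstOcc l s).map (fun p => p.1) := by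
  induction l with
  | nil => intro s; simp [pvFirstOcc, PySem.Set.update]
  | cons p t ih =>
    intro s
    by_cases h : p.1 ∈ s
    · simp [pvFirstOcc, h, PySem.Set.update_cons, ih s]
    · simp [pvFirstOcc, h, PySem.Set.update_cons, ih (s ++ [p.1])]

-- every first occurrence is what positions.find? returns for its x-coordinate
theorem pv_firstOcc_find (l : List (Int × Int × Int × Int)) :
    ∀ (s : List Int) (p : Int × Int × Int × Int), p ∈ pvFirstOcc l s →
      p.1 ∉ s ∧ l.find? (fun r => r.1 == p.1) = some p := by
  induction l with
  | nil => intro s p h; simp [pvFirstOcc] at h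
  | cons q t ih =>
    intro s p hp
    by_cases h : q.1 ∈ s
    · rw [pvFirstOcc, if_pos h] at hp
      obtain ⟨hns, hf⟩ := ih s p hp
      have hne : q.1 ≠ p.1 := fun he => hns (he ▸ h)
      refine ⟨hns, ?_⟩
      rw [List.find?_cons_of_neg (by simp [hne]), hf]
    · rw [pvFirstOcc, if_neg h] at hp
      rcases List.mem_cons.mp hp with rfl | hp'
      · exact ⟨h, by rw [List.find?_cons_of_pos (by simp)]⟩
      · obtain ⟨hns, hf⟩ := ih (s ++ [q.1]) p hp'
        have hns' : p.1 ∉ s := fun hm => hns (by simp [hm])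
        have hne : q.1 ≠ p.1 := fun he => hns (by simp [he])
        refine ⟨hns', ?_⟩
        rw [List.find?_cons_of_neg (by simp [hne]), hf]

-- duplicates never win a strict-maximum scan: the fold may skip them
theorem pv_pick_firstOcc (F : Int → Int) (l : List (Int × Int × Int × Int)) :
    ∀ (s : List Int) (b : Option (Int × Int × Int × Int)),
    (∀ x ∈ s, ∃ h, b = some h ∧ F x ≤ F h.1) →
    l.foldl (pvPickStep (fun p => F p.1)) b =
      (pvFirstOcc l s).foldl (pvPickStep (fun p => F p.1)) b := by
  induction l with
  | nil => intro s b _; rfl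
  | cons p t ih =>
    intro s b H
    by_cases h : p.1 ∈ s
    · obtain ⟨hb, rfl, hle⟩ := H p.1 h
      have hstep : pvPickStep (fun p => F p.1) (some hb) p = some hb := by
        simp [pvPickStep, not_lt.mpr hle]
      rw [pvFirstOcc, if_pos h, List.foldl_cons, hstep]
      exact ih s (some hb) H
    · rw [pvFirstOcc, if_neg h, List.foldl_cons, List.foldl_cons]
      apply ih (s ++ [p.1])
      intro x hx
      cases b with
      | none =>
        refine ⟨p, rfl, ?_⟩
        have : x = p.1 := by
          rcases List.mem_append.mp hx with hx' | hx'
          · exact absurd (H x hx') (by rintro ⟨_, h', _⟩; cases h')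
          · simpa using hx'
        simp [this]
      | some hb =>
        by_cases hlt : F hb.1 < F p.1
        · refine ⟨p, by simp [pvPickStep, hlt], ?_⟩
          rcases List.mem_append.mp hx with hx' | hx'
          · obtain ⟨h', he, hle⟩ := H x hx'
            cases he
            exact le_of_lt (lt_of_le_of_lt hle hlt)
          · simp_all
        · refine ⟨hb, by simp [pvPickStep, hlt], ?_⟩
          rcases List.mem_append.mp hx with hx' | hx'
          · obtain ⟨h', he, hle⟩ := H x hx'
            cases he
            exact hle
          · have : x = p.1 := by simpa using hx'
            exact this ▸ not_lt.mp hlt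

-- B's (best, best_count) pair fold is the pvPickStep fold (all counts are ≥ 1 > 0)
theorem pv_pair_fold (key : (Int × Int × Int × Int) → Int) (l : List (Int × Int × Int × Int)) :
    ∀ (b : Option (Int × Int × Int × Int)) (c : Int),
    (∀ p ∈ l, 1 ≤ key p) →
    (match b with | none => c = 0 | some h => c = key h) →
    l.foldl (fun st pos => if key pos > st.2 then (some pos, key pos) else st) (b, c) =
      (l.foldl (pvPickStep key) b,
       match l.foldl (pvPickStep key) b with | none => 0 | some h => key h) := by
  induction l with
  | nil =>
    intro b c _ hbc
    cases b with
    | none => simp_all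
    | some h => simp_all
  | cons p t ih =>
    intro b c hk hbc
    have hk' : ∀ q ∈ t, 1 ≤ key q := fun q hq => hk q (List.mem_cons_of_mem _ hq)
    rw [List.foldl_cons, List.foldl_cons]
    cases b with
    | none =>
      subst hbc
      have hp : key p > 0 := lt_of_lt_of_le one_pos (hk p List.mem_cons_self)
      rw [if_pos hp]
      exact ih (some p) (key p) hk' rfl
    | some h =>
      subst hbc
      by_cases hlt : key p > key h
      · rw [if_pos hlt]
        have : pvPickStep key (some h) p = some p := by simp [pvPickStep, hlt]
        rw [this]
        exact ih (some p) (key p) hk' rfl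
      · rw [if_neg hlt]
        have : pvPickStep key (some h) p = some h := by
          simp [pvPickStep, not_lt.mp (by simpa using hlt)]
        rw [this]
        exact ih (some h) (key h) hk' rfl

-- counting an x in x_coords = counting positions with that x
theorem pv_count_eq (positions : List (Int × Int × Int × Int)) (k : Int) :
    (positions.map (fun q => q.1)).count k = positions.countP (fun q => q.1 == k) := by
  simp [List.count, List.countP_map]
  rfl

-- ===== VERDICT (by name: the statement is the Claim_ definition above) =====
theorem get_most_common_position_spec : Claim_equal_get_most_common_position := by
  intro positions _
  unfold Spec_get_most_common_position
  by_cases hne : positions = []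
  · simp [get_most_common_position, get_most_common_position_alt, hne]
  · obtain ⟨p0, rest, rfl⟩ : ∃ p0 rest, positions = p0 :: rest := by
      cases positions with
      | nil => exact absurd rfl hne
      | cons p0 rest => exact ⟨p0, rest, rfl⟩
    set positions := p0 :: rest with hposs
    set xs := positions.map (fun pos => pos.1) with hxs
    -- the common key: how often an x-coordinate occurs
    set F : Int → Int := fun k => ((positions.countP (fun q => q.1 == k) : Nat) : Int) with hF
    -- the winner pstar: first strict maximum over the first occurrences
    have hfo : pvFirstOcc positions [] = p0 :: pvFirstOcc rest [p0.1] := by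
      simp [hposs, pvFirstOcc]
    obtain ⟨pstar, hpick0, hmem0⟩ :=
      pv_pick_some (fun p => F p.1) (pvFirstOcc rest [p0.1]) p0
    have hpickFO : (pvFirstOcc positions []).foldl (pvPickStep (fun p => F p.1)) none = some pstar := by
      rw [hfo, List.foldl_cons]
      simpa [pvPickStep] using hpick0
    have hmemFO : pstar ∈ pvFirstOcc positions [] := by
      rw [hfo]
      rcases hmem0 with h | h
      · exact h ▸ List.mem_cons_self
      · exact List.mem_cons_of_mem _ h
    -- the fold over all positions equals the fold over first occurrences
    have hpickALL : positions.foldl (pvPickStep (fun p => F p.1)) none = some pstar := by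
      rw [pv_pick_firstOcc F positions [] none (by intro x hx; simp at hx), hpickFO]
    -- pstar is what positions.find? returns for its x-coordinate
    have hfind : positions.find? (fun r => r.1 == pstar.1) = some pstar :=
      (pv_firstOcc_find positions [] pstar hmemFO).2
    -- A's side: head of the descending stable sort = (pstar.1, its count)
    have hsetfo : PySem.Set.ofList xs = (pvFirstOcc positions []).map (fun p => p.1) := by
      have := pv_update_firstOcc positions []
      simpa [PySem.Set.update_nil_left, hxs] using this
    have hcountF : (fun k => ((xs.count k : Nat) : Int)) = F := by
      funext k
      rw [hF, hxs, pv_count_eq]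
    have hA : (PySem.List.sorted (PySem.Dict.counter xs).items (fun p => p.2) true).head? =
        some (pstar.1, F pstar.1) := by
      rw [PySem.Dict.items_counter, PySem.List.sorted_rev_eq_foldl_insertBy,
        pv_head_foldl_insertBy]
      have h := pv_pick_map (g := fun k => (k, ((xs.count k : Nat) : Int)))
        (key := fun p : Int × Int => p.2) (PySem.Set.ofList xs) none
      simp only [Option.map_none] at h
      rw [show (([] : List (Int × Int)).head? = (none : Option (Int × Int))) from rfl, h, hcountF]
      have h2 := pv_pick_map (g := fun p : Int × Int × Int × Int => p.1)
        (key := F) (pvFirstOcc positions []) none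
      simp only [Option.map_none] at h2
      rw [hsetfo, h2, hpickFO]
      simp only [Option.map_some, Option.some.injEq, Prod.mk.injEq]
      exact ⟨trivial, congrFun hcountF pstar.1⟩
    -- assemble A
    have hAeq : get_most_common_position positions = some (pstar.1, pstar.2.1, pstar.2.2.1, pstar.2.2.2) := by
      unfold get_most_common_position
      rw [if_neg hne]
      cases hs : PySem.List.sorted (PySem.Dict.counter (positions.map (fun pos => pos.1))).items
          (fun p => p.2) true with
      | nil => rw [← hxs] at hs; rw [hs] at hA; cases hA
      | cons a tl =>
        rw [← hxs] at hs; rw [hs] at hA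
        simp only [List.head?_cons, Option.some.injEq] at hA
        subst hA
        simp [hfind]
    -- assemble B
    have hk1 : ∀ p ∈ positions, 1 ≤ (fun p => F p.1) p := by
      intro p hp
      have : 0 < positions.countP (fun q => q.1 == p.1) :=
        List.countP_pos_iff.mpr ⟨p, hp, by simp⟩
      simp only [hF]
      omega
    have hBeq : get_most_common_position_alt positions = some (pstar.1, pstar.2.1, pstar.2.2.1, pstar.2.2.2) := by
      unfold get_most_common_position_alt
      rw [if_neg hne]
      have hpair := pv_pair_fold (fun p => F p.1) positions none 0 hk1 rfl
      simp only [hF] at hpair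
      rw [hpair]
      simp only [hF] at hpickALL
      rw [hpickALL]
    rw [hAeq, hBeq]
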